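-- pv_equiv track=rewrite | github.com/franciscoBSalgueiro/FP-Projeto-1 | projeto1.py | obter_pin
-- ===== SOURCE A (Python) =====
-- def obter_posicao(char, pos):
--     """
--     Retorna o inteiro que corresponde à nova posição após o movimento
--
--     obter_posicao: cad. carateres × inteiro -> inteiro
--     """
--
--     if char == "C" and pos > 3:
--         pos -= 3
--     if char == "B" and pos < 7:
--         pos += 3
--     if char == "E" and (pos-1) % 3 > 0:
--         pos -= 1
--     if char == "D" and (pos-1) % 3 < 2:
--         pos += 1
--     return pos
--
-- def obter_digito(chars, pos):
--     """
--     Devolve inteiro correspondente ao dígito a marcar após todos os movimentos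
--
--     obter_digito: cad. carateres × inteiro -> inteiro
--     """
--
--     for char in chars:
--         pos = obter_posicao(char, pos)
--     return pos
--
-- def obter_pin(tuplo):
--     """
--     Retorna tuplo de inteiros com pin codificado com tuplo de movimentos
--
--     obter_pin: tuplo -> tuplo
--     """
--
--     # verificação do argumento
--     if not isinstance(tuplo, tuple) or not 4 <= len(tuplo) <= 10:
--         raise ValueError("obter_pin: argumento invalido")
--
--     pos = 5
--     pin = ()
--     for seq in tuplo:
--         # verificação de cada elemento do tuplo
--         if (
--             not isinstance(seq, str)
--             or len(seq) == 0
--             or not all(c in "CBED" for c in seq)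
--         ):
--             raise ValueError("obter_pin: argumento invalido")
--
--         pos = obter_digito(seq, pos)
--         pin = pin + (pos,)
--     return pin
-- ===== SOURCE B (Python) =====
-- def obter_pin(tuplo):
--     """2-D (row, col) keypad state with a delta table and clamping."""
--     if not isinstance(tuplo, tuple) or not 4 <= len(tuplo) <= 10:
--         raise ValueError("obter_pin: argumento invalido")
--     deltas = {'C': (-1, 0), 'B': (1, 0), 'E': (0, -1), 'D': (0, 1)}
--     row, col = 1, 1
--     pin = []
--     for seq in tuplo:
--         if (
--             not isinstance(seq, str)
--             or len(seq) == 0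
--             or not all(c in deltas for c in seq)
--         ):
--             raise ValueError("obter_pin: argumento invalido")
--         for ch in seq:
--             dr, dc = deltas[ch]
--             row = max(0, min(2, row + dr))
--             col = max(0, min(2, col + dc))
--         pin.append(3 * row + col + 1)
--     return tuple(pin)
-- ===== Notes on version B (the rewrite author's own statement) =====
-- stated objective: idiomatic
-- what changed: Replaces the threshold/modulo arithmetic on a single 1..9 position with a 2-D (row,col) state updated through a direction-delta table and per-axis clamping, recording 3*row+col+1 per sequence.
import Mathlib
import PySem

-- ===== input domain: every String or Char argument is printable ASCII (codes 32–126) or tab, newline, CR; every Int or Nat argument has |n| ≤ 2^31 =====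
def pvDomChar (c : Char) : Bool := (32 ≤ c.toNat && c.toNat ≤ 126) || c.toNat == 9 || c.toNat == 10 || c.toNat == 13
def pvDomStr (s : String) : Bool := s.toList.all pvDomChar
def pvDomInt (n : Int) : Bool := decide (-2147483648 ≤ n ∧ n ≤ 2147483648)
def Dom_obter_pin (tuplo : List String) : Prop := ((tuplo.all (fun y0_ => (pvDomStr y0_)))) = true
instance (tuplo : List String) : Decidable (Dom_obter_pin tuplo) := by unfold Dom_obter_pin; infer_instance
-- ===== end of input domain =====

-- B replaces the 1..9 position and threshold/modulo tests by a (row,col) state with a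
-- direction-delta table and per-axis clamping (idiomatic restructuring, same cost).

-- ===== PORT A =====
def obter_posicao (char : Char) (pos : Int) : Int :=
  let pos := if char = 'C' ∧ pos > 3 then pos - 3 else pos
  let pos := if char = 'B' ∧ pos < 7 then pos + 3 else pos
  let pos := if char = 'E' ∧ PySem.Int.mod (pos - 1) 3 > 0 then pos - 1 else pos
  let pos := if char = 'D' ∧ PySem.Int.mod (pos - 1) 3 < 2 then pos + 1 else pos
  pos

def obter_digito (chars : List Char) (pos : Int) : Int :=
  chars.foldl (fun p c => obter_posicao c p) pos

def obter_pin (tuplo : List String) : List Int :=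
  let st := tuplo.foldl (fun (st : Int × List Int) seq =>
    let pos := obter_digito seq.toList st.1
    (pos, st.2 ++ [pos])) (5, [])
  st.2

-- ===== PORT B =====
def pvDelta (c : Char) : Int × Int :=
  if c = 'C' then (-1, 0) else if c = 'B' then (1, 0)
  else if c = 'E' then (0, -1) else (0, 1)

def pvMove (rc : Int × Int) (c : Char) : Int × Int :=
  let d := pvDelta c
  (max 0 (min 2 (rc.1 + d.1)), max 0 (min 2 (rc.2 + d.2)))

def obter_pin_alt (tuplo : List String) : List Int :=
  let st := tuplo.foldl (fun (st : (Int × Int) × List Int) seq =>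
    let rc := seq.toList.foldl pvMove st.1
    (rc, st.2 ++ [3 * rc.1 + rc.2 + 1])) ((1, 1), [])
  st.2

-- ===== PRECONDITION & SPEC =====
-- Pre_ excludes exactly the inputs where A raises ValueError: tuples of fewer than 4 or
-- more than 10 sequences, or containing an empty sequence or a character outside "CBED".
def Pre_obter_pin (tuplo : List String) : Prop :=
  4 ≤ tuplo.length ∧ tuplo.length ≤ 10 ∧
  (tuplo.all (fun s => !s.toList.isEmpty && s.toList.all (fun c => c ∈ ['C','B','E','D']))) = true
instance (tuplo : List String) : Decidable (Pre_obter_pin tuplo) := by unfold Pre_obter_pin; infer_instance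

def pvWitness_obter_pin : List String := ["C", "B", "ED", "CB"]

def Spec_obter_pin (tuplo : List String) (out : List Int) : Prop := out = obter_pin_alt tuplo
instance (tuplo : List String) (out : List Int) : Decidable (Spec_obter_pin tuplo out) := by unfold Spec_obter_pin; infer_instance

-- ===== CLAIM (what is proved, stated in full; the proofs are below) =====
def Claim_equal_obter_pin : Prop := ∀ (tuplo : List String), Dom_obter_pin tuplo → Pre_obter_pin tuplo → Spec_obter_pin tuplo (obter_pin tuplo)

-- ===== LEMMAS AND PROOFS =====

-- invariant tying A's 1..9 position to B's (row, col)
def pvInv (pos : Int) (rc : Int × Int) : Prop :=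
  pos = 3 * rc.1 + rc.2 + 1 ∧ 0 ≤ rc.1 ∧ rc.1 ≤ 2 ∧ 0 ≤ rc.2 ∧ rc.2 ≤ 2

theorem pvInv_step (c : Char) (hc : c ∈ ['C','B','E','D']) (pos : Int) (rc : Int × Int)
    (h : pvInv pos rc) : pvInv (obter_posicao c pos) (pvMove rc c) := by
  obtain ⟨r, co⟩ := rc
  obtain ⟨hp, h1, h2, h3, h4⟩ := h
  simp only [List.mem_cons, List.not_mem_nil, or_false] at hc
  have hmod : PySem.Int.mod (pos - 1) 3 = co := by
    simp only [PySem.Int.mod, Int.fmod_eq_emod]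
    norm_num
    omega
  rcases hc with rfl | rfl | rfl | rfl <;>
    simp only [obter_posicao, pvMove, pvDelta, pvInv, Char.reduceEq, true_and, false_and,
      if_false, if_true, hmod] <;>
    split_ifs <;> omega

theorem pvInv_digito (chars : List Char) (hc : ∀ c ∈ chars, c ∈ ['C','B','E','D'])
    (pos : Int) (rc : Int × Int) (h : pvInv pos rc) :
    pvInv (obter_digito chars pos) (chars.foldl pvMove rc) := by
  induction chars generalizing pos rc with
  | nil => exact h
  | cons c cs ih =>
    simp only [obter_digito, List.foldl_cons] at *
    exact ih (fun x hx => hc x (List.mem_cons_of_mem _ hx)) _ _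
      (pvInv_step c (hc c (List.mem_cons_self)) pos rc h)

theorem pv_loop (tuplo : List String)
    (hv : ∀ s ∈ tuplo, ∀ c ∈ s.toList, c ∈ ['C','B','E','D'])
    (pos : Int) (rc : Int × Int) (acc : List Int) (h : pvInv pos rc) :
    (tuplo.foldl (fun (st : Int × List Int) seq =>
        let p := obter_digito seq.toList st.1
        (p, st.2 ++ [p])) (pos, acc)).2 =
    (tuplo.foldl (fun (st : (Int × Int) × List Int) seq =>
        let rc := seq.toList.foldl pvMove st.1
        (rc, st.2 ++ [3 * rc.1 + rc.2 + 1])) (rc, acc)).2 := by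
  induction tuplo generalizing pos rc acc with
  | nil => rfl
  | cons s ss ih =>
    simp only [List.foldl_cons]
    have hinv := pvInv_digito s.toList (hv s (List.mem_cons_self)) pos rc h
    have heq : obter_digito s.toList pos =
        3 * (s.toList.foldl pvMove rc).1 + (s.toList.foldl pvMove rc).2 + 1 := hinv.1
    rw [heq]
    exact ih (fun t ht => hv t (List.mem_cons_of_mem _ ht)) _ _ _ (heq ▸ hinv)

-- ===== VERDICT (by name: the statement is the Claim_ definition above) =====
theorem obter_pin_spec : Claim_equal_obter_pin := by
  intro tuplo _ hpre
  obtain ⟨_, _, hall⟩ := hpre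
  unfold Spec_obter_pin obter_pin obter_pin_alt
  refine (pv_loop tuplo ?_ 5 (1, 1) [] (by norm_num [pvInv])).symm ▸ rfl
  intro s hs c hc
  have := List.all_eq_true.mp hall s hs
  simp only [Bool.and_eq_true] at this
  have := List.all_eq_true.mp this.2 c hc
  simpa using this
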